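-- pv_equiv track=rewrite | github.com/childe/leetcode | split-array-into-consecutive-subsequences/solution.py | findEndsPoints
-- ===== SOURCE A (Python) =====
-- def findEndsPoints(nums: list[int]) -> list[int]:
--     """
--     >>> s = Solution()
--     >>> s.findEndsPoints([1,2,4,5])
--     [2, 5]
--     >>> s.findEndsPoints([1,2,2,3,3,3])
--     [3, 3, 3]
--     >>> s.findEndsPoints([1,2,2,2,2,3,3,3])
--     [2, 3, 3, 3]
--     >>> s.findEndsPoints([1,2,3])
--     [3]
--     >>> s.findEndsPoints([1,2,3,4,4,5])
--     [4, 5]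
--     >>> s.findEndsPoints([1,2,3,3,4,5])
--     [3, 5]
--     >>> s.findEndsPoints([1,2,3,3,4,4,5,5])
--     [5, 5]
--     """
--     rst = []
--
--     counter = dict([(n, int(0)) for n in range(nums[0] - 1, nums[-1] + 2)])
--     for n in nums:
--         counter[n] += 1
--
--     for i in range(nums[0], nums[-1] + 1):
--         rst.extend([i] * (counter[i] - counter[i + 1]))
--
--     return rst
-- ===== SOURCE B (Python) =====
-- def findEndsPoints(nums: list[int]) -> list[int]:
--     # one run-length pass over the (sorted) input: compare each run of value v
--     # with the immediately following run of v+1; no dictionary, no range scan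
--     rst = []
--     i, n = 0, len(nums)
--     while i < n:
--         v = nums[i]
--         j = i
--         while j < n and nums[j] == v:
--             j += 1
--         k = j
--         while k < n and nums[k] == v + 1:
--             k += 1
--         rst += [v] * ((j - i) - (k - j))  # a negative multiplier yields []
--         i = j
--     return rst
-- ===== Notes on version B (the rewrite author's own statement) =====
-- stated objective: faster
-- what changed: A builds a dense zero-initialised counter dict over the whole numeric range from one below the minimum to one above the maximum and then scans every integer in that range; B uses no dictionary at all: one two-pointer run-length pass over the sorted input, comparing each run of value v with the immediately following run of v+1.
-- outside the precondition, e.g. on findEndsPoints([2, 1, 1, 1, 2]): A returns [2, 2], B returns [2, 1, 1, 2]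
import Mathlib
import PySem

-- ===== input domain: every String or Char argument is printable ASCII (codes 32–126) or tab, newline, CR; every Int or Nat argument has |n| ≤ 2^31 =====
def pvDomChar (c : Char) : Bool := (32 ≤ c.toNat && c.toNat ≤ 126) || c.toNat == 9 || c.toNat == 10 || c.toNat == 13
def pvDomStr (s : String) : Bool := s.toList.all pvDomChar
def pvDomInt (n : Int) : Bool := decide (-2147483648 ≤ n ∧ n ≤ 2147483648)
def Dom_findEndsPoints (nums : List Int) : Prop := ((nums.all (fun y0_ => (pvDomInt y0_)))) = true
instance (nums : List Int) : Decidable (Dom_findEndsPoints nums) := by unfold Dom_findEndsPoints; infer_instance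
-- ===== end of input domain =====

-- B replaces A's dense counter over the whole numeric span of the input by a single
-- two-pointer run-length pass over the sorted input, with no dictionary (objective: faster).

-- ===== PORT A =====
-- counter = dict([(n, 0) for n in range(nums[0]-1, nums[-1]+2)]); for n in nums: counter[n] += 1
-- (counter[n] exists for every n under Pre_, so modify is exact)
def pvCounterA (first last : Int) (nums : List Int) : PySem.Dict Int Int :=
  nums.foldl (fun d n => d.modify n 0 (· + 1))
    (((PySem.List.pyRange (first - 1) (last + 2)).map (fun n => (n, (0 : Int)))).foldl
      (fun d p => d.insert p.1 p.2) PySem.Dict.empty)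

def findEndsPoints (nums : List Int) : List Int :=
  match PySem.List.pyGet? nums 0, PySem.List.pyGet? nums (-1) with
  | some first, some last =>
    -- for i in range(nums[0], nums[-1]+1): rst.extend([i] * (counter[i] - counter[i + 1]))
    -- (both keys i and i+1 exist under Pre_, so getD _ 0 is exact)
    (PySem.List.pyRange first (last + 1)).foldl
      (fun rst i => rst ++ PySem.List.pyRepeat [i]
        ((pvCounterA first last nums).getD i 0 - (pvCounterA first last nums).getD (i + 1) 0)) []
  | _, _ => []   -- unreachable under Pre_: Python raises IndexError on the empty list

-- ===== PORT B =====
-- the inner 'while nums[j] == v: j += 1' pointer advance: length of the leading run of v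
-- and the remainder of the list after it
def pvRun (v : Int) : List Int → Nat × List Int
  | [] => (0, [])
  | x :: t => if x = v then ((pvRun v t).1 + 1, (pvRun v t).2) else (0, x :: t)

theorem pvRun_snd_length_le (v : Int) (l : List Int) : (pvRun v l).2.length ≤ l.length := by
  induction l with
  | nil => simp [pvRun]
  | cons x t ih =>
    simp only [pvRun]
    split
    · exact le_trans ih (Nat.le_succ _)
    · exact le_refl _

-- the outer while loop: take the run of v = nums[i], measure the following run of v+1,
-- append [v] * ((j-i) - (k-j)) (Nat subtraction = Python's empty list on a negative multiplier)
def pvScanB : List Int → List Int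
  | [] => []
  | x :: t =>
    List.replicate (((pvRun x t).1 + 1) - (pvRun (x + 1) (pvRun x t).2).1) x
      ++ pvScanB (pvRun x t).2
termination_by l => l.length
decreasing_by
  exact Nat.lt_succ_of_le (pvRun_snd_length_le x t)

def findEndsPoints_alt (nums : List Int) : List Int := pvScanB nums

-- ===== PRECONDITION & SPEC =====
-- Pre_ restricts to the problem's natural domain (a non-empty list sorted in non-decreasing
-- order): A raises IndexError on the empty list, and on unsorted input it raises KeyError or
-- silently drops values lying below the first or above the last element.
def Pre_findEndsPoints (nums : List Int) : Prop := nums ≠ [] ∧ nums.Pairwise (· ≤ ·)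
instance (nums : List Int) : Decidable (Pre_findEndsPoints nums) := by
  unfold Pre_findEndsPoints; infer_instance

def pvWitness_findEndsPoints : List Int := [1, 2, 2, 3]

def Spec_findEndsPoints (nums : List Int) (out : List Int) : Prop := out = findEndsPoints_alt nums
instance (nums : List Int) (out : List Int) : Decidable (Spec_findEndsPoints nums out) := by
  unfold Spec_findEndsPoints; infer_instance

-- ===== CLAIM (what is proved, stated in full; the proofs are below) =====
def Claim_equal_findEndsPoints : Prop := ∀ (nums : List Int), Dom_findEndsPoints nums → Pre_findEndsPoints nums → Spec_findEndsPoints nums (findEndsPoints nums)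

-- ===== LEMMAS AND PROOFS =====

-- Python's l[0] and l[-1] on a non-empty list
theorem pv_pyGet?_zero (l : List Int) (hne : l ≠ []) :
    PySem.List.pyGet? l 0 = some (l.headD 0) := by
  cases l with
  | nil => exact absurd rfl hne
  | cons a t => simp [PySem.List.pyGet?, PySem.List.pyIdx?]

theorem pv_pyGet?_neg_one (l : List Int) (hne : l ≠ []) :
    PySem.List.pyGet? l (-1) = some (l.getLastD 0) := by
  have hlen : 0 < l.length := List.length_pos_iff.mpr hne
  simp only [PySem.List.pyGet?, PySem.List.pyIdx?]
  rw [if_neg (by omega), if_pos (by omega)]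
  simp only [Option.bind_some]
  have : l.length - (-(-1 : Int)).toNat = l.length - 1 := by norm_num
  rw [this, List.getElem?_eq_getElem (by omega)]
  rw [List.getLastD_eq_getLast?, List.getLast?_eq_getElem?,
      List.getElem?_eq_getElem (by omega)]
  rfl

-- every element of a non-empty ≤-sorted list lies between its head and its last element
theorem pv_bounds (l : List Int) (hne : l ≠ []) (hs : l.Pairwise (· ≤ ·))
    (x : Int) (hx : x ∈ l) : l.headD 0 ≤ x ∧ x ≤ l.getLastD 0 := by
  constructor
  · cases l with
    | nil => exact absurd rfl hne
    | cons a t =>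
      rcases List.mem_cons.mp hx with rfl | hx
      · simp
      · simpa using (List.pairwise_cons.mp hs).1 x hx
  · have hdec := (List.dropLast_append_getLast hne).symm
    rw [List.getLastD_eq_getLast?, List.getLast?_eq_some_getLast (h := hne), Option.getD_some]
    rw [hdec] at hs hx
    rcases List.mem_append.mp hx with hx | hx
    · exact (List.pairwise_append.mp hs).2.2 x hx _ (List.mem_singleton_self _)
    · exact le_of_eq (List.mem_singleton.mp hx)

-- the zero-initialised dict of port A maps everything to 0 (under getD _ 0)
theorem pv_zero_dict (l : List Int) (d : PySem.Dict Int Int)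
    (hd : ∀ v, d.getD v 0 = 0) (v : Int) :
    (l.foldl (fun d n => d.insert n (0 : Int)) d).getD v 0 = 0 := by
  induction l generalizing d with
  | nil => exact hd v
  | cons a t ih =>
    simp only [List.foldl_cons]
    refine ih _ (fun w => ?_)
    rw [PySem.Dict.getD_insert]
    split <;> simp [hd]

-- a flatMap may be restricted to the elements where its body is non-empty
theorem pv_flatMap_filter (g : Int → List Int) (p : Int → Bool) :
    ∀ (l : List Int), (∀ x ∈ l, p x = false → g x = []) →
      l.flatMap g = (l.filter p).flatMap g := by
  intro l
  induction l with
  | nil => intro _; rfl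
  | cons a t ih =>
    intro h
    simp only [List.flatMap_cons, List.filter_cons]
    cases hp : p a with
    | true => simp [List.flatMap_cons, ih (fun x hx => h x (List.mem_cons_of_mem a hx))]
    | false =>
      rw [h a (List.mem_cons_self) hp]
      simpa using ih (fun x hx => h x (List.mem_cons_of_mem a hx))

-- pvRun on a sorted list whose elements are all ≥ v: it extracts exactly the
-- occurrences of v, and the remainder is sorted with all elements > v
theorem pvRun_sorted (v : Int) (l : List Int) (hs : l.Pairwise (· ≤ ·))
    (hge : ∀ y ∈ l, v ≤ y) :
    (pvRun v l).1 = l.count v ∧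
    l = List.replicate (l.count v) v ++ (pvRun v l).2 ∧
    (pvRun v l).2.Pairwise (· ≤ ·) ∧
    ∀ y ∈ (pvRun v l).2, v < y := by
  induction l with
  | nil => simp [pvRun]
  | cons x t ih =>
    obtain ⟨hxt, hst⟩ := List.pairwise_cons.mp hs
    by_cases hx : x = v
    · subst hx
      obtain ⟨h1, h2, h3, h4⟩ := ih hst (fun y hy => hxt y hy)
      have hc : (x :: t).count x = t.count x + 1 := by simp
      simp only [pvRun, if_pos]
      refine ⟨by simp [hc, h1], ?_, h3, h4⟩
      rw [hc, List.replicate_succ, List.cons_append]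
      exact congrArg (x :: ·) h2
    · have hvx : v < x := lt_of_le_of_ne (hge x (List.mem_cons_self)) (fun h => hx h.symm)
      have hc0 : (x :: t).count v = 0 := by
        rw [List.count_eq_zero]
        intro hmem
        rcases List.mem_cons.mp hmem with rfl | hmem
        · exact hx rfl
        · exact absurd (hxt v hmem) (by omega)
      refine ⟨?_, ?_, ?_, ?_⟩
      · simp [pvRun, hx, hc0]
      · simp [pvRun, hx, hc0]
      · simp only [pvRun, if_neg hx]; exact hs
      · simp only [pvRun, if_neg hx]
        intro y hy
        rcases List.mem_cons.mp hy with rfl | hy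
        · exact hvx
        · exact lt_of_lt_of_le hvx (hxt y hy)

-- B's run scan on a sorted list equals the per-value flatMap over its distinct values
theorem pvScanB_sorted_aux (N : Nat) : ∀ (l : List Int), l.length ≤ N → l.Pairwise (· ≤ ·) →
    pvScanB l = (PySem.List.sorted (PySem.Set.ofList l) (fun x => x)).flatMap
      (fun v => List.replicate ((l.count v : Int) - (l.count (v + 1) : Int)).toNat v) := by
  induction N with
  | zero =>
    intro l hl _
    have : l = [] := List.eq_nil_of_length_eq_zero (Nat.le_zero.mp hl)
    subst this
    simp [pvScanB]
  | succ N ih =>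
    intro l hl hs
    match l with
    | [] => simp [pvScanB]
    | x :: t =>
      obtain ⟨hxt, hst⟩ := List.pairwise_cons.mp hs
      obtain ⟨h1, h2, h3, h4⟩ := pvRun_sorted x t hst hxt
      set c := (pvRun x t).1 with hcdef
      set r := (pvRun x t).2 with hrdef
      obtain ⟨hd, _, _, _⟩ := pvRun_sorted (x + 1) r h3 (fun y hy => by have := h4 y hy; omega)
      set d := (pvRun (x + 1) r).1 with hddef
      -- counts in l
      have hxr : ∀ y ∈ r, x < y := h4
      have hcxr : r.count x = 0 := List.count_eq_zero.mpr (fun h => lt_irrefl x (hxr x h))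
      have hcount_x : (x :: t).count x = c + 1 := by
        rw [List.count_cons_self, h2, List.count_append, List.count_replicate_self, hcxr, h1]
      have hcount_ne : ∀ v : Int, x ≠ v → (x :: t).count v = r.count v := by
        intro v hv
        rw [List.count_cons_of_ne hv, h2, List.count_append, List.count_replicate]
        simp [hv]
      have hcount_x1 : (x :: t).count (x + 1) = d := by
        rw [hcount_ne (x + 1) (by omega), hd]
      -- the sorted distinct values of l
      have hsortedr := PySem.List.sorted_ofList_pairwise_lt (xs := r)
      have hmemr : ∀ y ∈ PySem.List.sorted (PySem.Set.ofList r) (fun x => x) false, x < y := by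
        intro y hy
        rw [PySem.List.mem_sorted, PySem.Set.mem_ofList] at hy
        exact hxr y hy
      have hsplit : PySem.List.sorted (PySem.Set.ofList (x :: t)) (fun x => x) =
          x :: PySem.List.sorted (PySem.Set.ofList r) (fun x => x) := by
        refine PySem.List.sorted_eq_of_perm_of_pairwise_lt _ _ _ ?_ ?_
        · rw [List.perm_ext_iff_of_nodup ?_ (PySem.Set.nodup_ofList _)]
          · intro y
            simp only [List.mem_cons, PySem.List.mem_sorted, PySem.Set.mem_ofList]
            rw [h2, List.mem_append]
            constructor
            · rintro (rfl | hy)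
              · exact Or.inl rfl
              · exact Or.inr (Or.inr hy)
            · rintro (rfl | hy | hy)
              · exact Or.inl rfl
              · exact Or.inl (List.eq_of_mem_replicate hy)
              · exact Or.inr hy
          · exact List.nodup_cons.mpr
              ⟨fun h => lt_irrefl x (hmemr x h),
               ((PySem.List.sorted_perm _ _ _).nodup_iff).mpr (PySem.Set.nodup_ofList _)⟩
        · exact List.pairwise_cons.mpr ⟨hmemr, hsortedr⟩
      -- lengths
      have hlr : r.length ≤ t.length := pvRun_snd_length_le x t
      -- unfold one step of pvScanB
      rw [show pvScanB (x :: t) =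
            List.replicate ((c + 1) - d) x ++ pvScanB r from by rw [pvScanB],
          hsplit, List.flatMap_cons, hcount_x, hcount_x1]
      congr 1
      · rw [Int.toNat_sub]
      · rw [ih r (le_trans hlr (Nat.le_of_succ_le_succ hl)) h3]
        refine List.flatMap_congr (fun v hv => ?_)
        rw [PySem.List.mem_sorted, PySem.Set.mem_ofList] at hv
        have hvx := hxr v hv
        rw [hcount_ne v (by omega), hcount_ne (v + 1) (by omega)]

theorem pvScanB_sorted (l : List Int) (hs : l.Pairwise (· ≤ ·)) :
    pvScanB l = (PySem.List.sorted (PySem.Set.ofList l) (fun x => x)).flatMap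
      (fun v => List.replicate ((l.count v : Int) - (l.count (v + 1) : Int)).toNat v) :=
  pvScanB_sorted_aux l.length l (le_refl _) hs

-- the two sides agree on sorted non-empty input
theorem pv_core (nums : List Int) (hne : nums ≠ []) (hs : nums.Pairwise (· ≤ ·)) :
    findEndsPoints nums = findEndsPoints_alt nums := by
  set a := nums.headD 0 with ha
  set b := nums.getLastD 0 with hb
  set g : Int → List Int :=
    fun v => List.replicate ((nums.count v : Int) - (nums.count (v + 1) : Int)).toNat v with hg
  -- ---- A's side ----
  have hA : findEndsPoints nums = (PySem.List.pyRange a (b + 1)).flatMap g := by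
    unfold findEndsPoints
    rw [pv_pyGet?_zero nums hne, pv_pyGet?_neg_one nums hne]
    simp only [← ha, ← hb]
    have hcnt : ∀ v : Int, (pvCounterA a b nums).getD v 0 = (nums.count v : Int) := by
      intro v
      unfold pvCounterA
      rw [PySem.Dict.getD_foldl_modify_add_one, List.foldl_map,
          pv_zero_dict _ _ (fun w => PySem.Dict.getD_empty w 0), zero_add]
    rw [PySem.List.foldl_congr_mem _ _
        (fun rst i => rst ++ g i) []
        (by intro acc x _; rw [hcnt, hcnt, hg, PySem.List.pyRepeat_singleton]),
      PySem.List.foldl_append_eq_flatMap, List.nil_append]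
  -- ---- B's side ----
  have hB : findEndsPoints_alt nums =
      (PySem.List.sorted (PySem.Set.ofList nums) (fun x => x)).flatMap g :=
    pvScanB_sorted nums hs
  -- ---- the two index lists carry the same non-empty contributions ----
  rw [hA, hB]
  have hbound : ∀ x ∈ nums, a ≤ x ∧ x ≤ b := fun x hx => pv_bounds nums hne hs x hx
  have hgz : ∀ x : Int, x ∉ nums → g x = [] := by
    intro x hx
    have : nums.count x = 0 := List.count_eq_zero.mpr hx
    rw [hg]
    simp only [this]
    rw [Int.toNat_of_nonpos (by omega), List.replicate_zero]
  have hfilter : (PySem.List.pyRange a (b + 1)).filter (fun x => decide (x ∈ nums)) =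
      PySem.List.sorted (PySem.Set.ofList nums) (fun x => x) := by
    refine (PySem.List.sorted_eq_of_perm_of_pairwise_lt _ _ _ ?_ ?_).symm
    · rw [List.perm_ext_iff_of_nodup
        (List.Nodup.filter _ (PySem.List.nodup_pyRange_one _ _)) (PySem.Set.nodup_ofList nums)]
      intro x
      rw [List.mem_filter, PySem.List.mem_pyRange_one, PySem.Set.mem_ofList]
      constructor
      · rintro ⟨_, hx⟩; exact of_decide_eq_true hx
      · intro hx
        obtain ⟨h1, h2⟩ := hbound x hx
        exact ⟨⟨h1, by omega⟩, decide_eq_true hx⟩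
    · exact List.Pairwise.filter _ (PySem.List.pairwise_lt_pyRange_one a (b + 1))
  rw [pv_flatMap_filter g (fun x => decide (x ∈ nums)) _
        (fun x _ hx => hgz x (by simpa using hx)),
      hfilter]

-- ===== VERDICT (by name: the statement is the Claim_ definition above) =====
theorem findEndsPoints_spec : Claim_equal_findEndsPoints := by
  intro nums _ hpre
  exact pv_core nums hpre.1 hpre.2
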